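-- pv_equiv track=rewrite | github.com/dsiberia9s/GUI | main.py | GUIPString
-- ===== SOURCE A (Python) =====
-- def GUIPString(idSp, sp, srcStr):
--     dstStr = ''
--     cnt = 0
--     for i in range(len(srcStr)):
--         if srcStr[i] == sp:
--             cnt += 1
--             pass
--         else:
--             if cnt == idSp:
--                 dstStr += srcStr[i]
--                 pass
--             elif cnt > idSp:
--                 break
--             pass
--         pass
--     return dstStr
-- ===== SOURCE B (Python) =====
-- def GUIPString(idSp, sp, srcStr):
--     # Build the full table of separator-delimited fields, then index it.
--     fields = []
--     cur = ''
--     for c in srcStr: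
--         if c == sp:
--             fields.append(cur)
--             cur = ''
--         else:
--             cur += c
--     fields.append(cur)
--     return fields[idSp] if 0 <= idSp < len(fields) else ''
-- ===== Notes on version B (the rewrite author's own statement) =====
-- stated objective: alternative
-- what changed: A accumulates only the target field char-by-char while counting separators with an early break; B splits the whole string into a table of fields in one pass and then indexes that table with a bounds check.
import Mathlib
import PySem

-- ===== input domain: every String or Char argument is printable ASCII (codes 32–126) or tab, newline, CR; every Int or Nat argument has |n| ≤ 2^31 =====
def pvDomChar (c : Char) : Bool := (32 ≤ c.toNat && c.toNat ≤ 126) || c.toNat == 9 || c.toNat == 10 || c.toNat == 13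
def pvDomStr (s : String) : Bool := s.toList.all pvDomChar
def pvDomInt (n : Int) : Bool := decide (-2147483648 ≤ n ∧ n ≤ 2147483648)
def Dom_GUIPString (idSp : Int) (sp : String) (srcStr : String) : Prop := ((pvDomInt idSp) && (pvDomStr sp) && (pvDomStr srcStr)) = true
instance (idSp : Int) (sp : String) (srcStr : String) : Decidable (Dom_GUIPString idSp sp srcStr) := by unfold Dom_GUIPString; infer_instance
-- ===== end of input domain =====

-- B builds the whole table of separator-delimited fields in one pass and indexes it,
-- instead of A's counter-driven single-field accumulation with an early break (objective: simpler).

-- ===== PORT A =====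
-- A's for-loop with its early `break`: structural recursion over the characters,
-- carrying the separator count `cnt`; `srcStr[i] == sp` is char-vs-string equality.
def GUIPString.loopA (idSp : Int) (sp : List Char) : List Char → Int → List Char
  | [], _ => []
  | c :: rest, cnt =>
    if [c] = sp then GUIPString.loopA idSp sp rest (cnt + 1)
    else if cnt = idSp then c :: GUIPString.loopA idSp sp rest cnt
    else if cnt > idSp then []
    else GUIPString.loopA idSp sp rest cnt

def GUIPString (idSp : Int) (sp : String) (srcStr : String) : String :=
  String.mk (GUIPString.loopA idSp sp.toList srcStr.toList 0)

-- ===== PORT B =====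
def GUIPString_alt (idSp : Int) (sp : String) (srcStr : String) : String :=
  let st := srcStr.toList.foldl
    (fun (st : List (List Char) × List Char) c =>
      if [c] = sp.toList then (st.1 ++ [st.2], ([] : List Char)) else (st.1, st.2 ++ [c]))
    ([], [])
  let fields := st.1 ++ [st.2]
  if 0 ≤ idSp ∧ idSp < (fields.length : Int) then
    String.mk ((PySem.List.pyGet? fields idSp).getD [])
  else ""

-- ===== PRECONDITION & SPEC =====
def Spec_GUIPString (idSp : Int) (sp : String) (srcStr : String) (out : String) : Prop := out = GUIPString_alt idSp sp srcStr
instance (idSp : Int) (sp : String) (srcStr : String) (out : String) : Decidable (Spec_GUIPString idSp sp srcStr out) := by unfold Spec_GUIPString; infer_instance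

-- ===== CLAIM (what is proved, stated in full; the proofs are below) =====
def Claim_equal_GUIPString : Prop := ∀ (idSp : Int) (sp : String) (srcStr : String), Dom_GUIPString idSp sp srcStr → Spec_GUIPString idSp sp srcStr (GUIPString idSp sp srcStr)

-- ===== LEMMAS AND PROOFS =====

-- common reference function: the idSp-th field, consuming the string left to right
def gField (sp : List Char) (idSp : Int) : List Char → List Char
  | [] => []
  | c :: rest =>
    if [c] = sp then gField sp (idSp - 1) rest
    else if idSp = 0 then c :: gField sp 0 rest
    else if idSp < 0 then []
    else gField sp idSp rest

-- list of fields produced from remaining input `cs` with current partial field `cur`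
def fieldsOf (sp : List Char) : List Char → List Char → List (List Char)
  | [], cur => [cur]
  | c :: rest, cur => if [c] = sp then cur :: fieldsOf sp rest [] else fieldsOf sp rest (cur ++ [c])

theorem loopA_eq_gField (idSp : Int) (sp : List Char) (cs : List Char) :
    ∀ cnt : Int, GUIPString.loopA idSp sp cs cnt = gField sp (idSp - cnt) cs := by
  induction cs with
  | nil => intro cnt; rfl
  | cons c rest ih =>
    intro cnt
    simp only [GUIPString.loopA, gField]
    by_cases hsep : [c] = sp
    · rw [if_pos hsep, if_pos hsep, ih (cnt + 1),
        show idSp - (cnt + 1) = idSp - cnt - 1 from by omega]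
    · simp only [if_neg hsep]
      by_cases h0 : cnt = idSp
      · rw [if_pos h0, if_pos (show idSp - cnt = 0 from by omega), ih cnt,
          show idSp - cnt = 0 from by omega]
      · have hne : ¬ idSp - cnt = 0 := by omega
        simp only [if_neg h0, if_neg hne]
        by_cases hgt : cnt > idSp
        · rw [if_pos hgt, if_pos (show idSp - cnt < 0 from by omega)]
        · rw [if_neg hgt, if_neg (show ¬ idSp - cnt < 0 from by omega), ih cnt]

theorem fieldsOf_ne_nil (sp cs cur : List Char) : fieldsOf sp cs cur ≠ [] := by
  induction cs generalizing cur with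
  | nil => simp [fieldsOf]
  | cons c rest ih => simp only [fieldsOf]; split <;> simp [ih]

theorem fieldsOf_cur (sp cs : List Char) :
    ∀ cur, fieldsOf sp cs cur = (fieldsOf sp cs []).modifyHead (cur ++ ·) := by
  induction cs with
  | nil => intro cur; simp [fieldsOf]
  | cons c rest ih =>
    intro cur
    simp only [fieldsOf]
    by_cases hsep : [c] = sp
    · simp [hsep]
    · simp only [if_neg hsep, List.nil_append]
      rw [ih (cur ++ [c]), ih [c]]
      obtain ⟨h, t, hht⟩ : ∃ h t, fieldsOf sp rest [] = h :: t := by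
        cases hf : fieldsOf sp rest [] with
        | nil => exact absurd hf (fieldsOf_ne_nil sp rest [])
        | cons h t => exact ⟨h, t, rfl⟩
      simp [hht]

theorem gField_neg (sp : List Char) (cs : List Char) :
    ∀ idSp : Int, idSp < 0 → gField sp idSp cs = [] := by
  induction cs with
  | nil => intro i _; rfl
  | cons c rest ih =>
    intro i hi
    simp only [gField]
    by_cases hsep : [c] = sp
    · rw [if_pos hsep]; exact ih _ (by omega)
    · simp [hsep, show ¬ i = 0 from by omega, hi]

theorem gField_nat (sp cs : List Char) :
    ∀ n : Nat, gField sp (n : Int) cs = (fieldsOf sp cs []).getD n [] := by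
  induction cs with
  | nil =>
    intro n
    cases n <;> rfl
  | cons c rest ih =>
    intro n
    simp only [gField, fieldsOf, List.nil_append]
    by_cases hsep : [c] = sp
    · simp only [if_pos hsep]
      cases n with
      | zero =>
        rw [show ((0 : Nat) : Int) - 1 = -1 from by omega,
          gField_neg sp rest (-1) (by omega)]
        rfl
      | succ m =>
        rw [show ((m + 1 : Nat) : Int) - 1 = (m : Int) from by omega, ih m]
        rfl
    · simp only [if_neg hsep]
      rw [fieldsOf_cur sp rest [c]]
      obtain ⟨h, t, hht⟩ : ∃ h t, fieldsOf sp rest [] = h :: t := by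
        cases hf : fieldsOf sp rest [] with
        | nil => exact absurd hf (fieldsOf_ne_nil sp rest [])
        | cons h t => exact ⟨h, t, rfl⟩
      rw [hht]
      cases n with
      | zero =>
        have hh : gField sp ((0 : Nat) : Int) rest = h := by rw [ih 0, hht]; rfl
        simp only [Nat.cast_zero] at hh ⊢
        simp [hh]
      | succ m =>
        rw [if_neg (by omega), if_neg (by omega), ih (m + 1), hht]
        rfl

theorem foldl_fieldsOf (sp : List Char) (cs : List Char) :
    ∀ (fs : List (List Char)) (cur : List Char),
      (cs.foldl
        (fun (st : List (List Char) × List Char) c =>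
          if [c] = sp then (st.1 ++ [st.2], ([] : List Char)) else (st.1, st.2 ++ [c]))
        (fs, cur)).1 ++
      [(cs.foldl
        (fun (st : List (List Char) × List Char) c =>
          if [c] = sp then (st.1 ++ [st.2], ([] : List Char)) else (st.1, st.2 ++ [c]))
        (fs, cur)).2] = fs ++ fieldsOf sp cs cur := by
  induction cs with
  | nil => intro fs cur; simp [fieldsOf]
  | cons c rest ih =>
    intro fs cur
    simp only [List.foldl_cons, fieldsOf]
    by_cases hsep : [c] = sp
    · simp [hsep, ih]
    · simp [hsep, ih]

-- ===== VERDICT (by name: the statement is the Claim_ definition above) =====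
theorem GUIPString_spec : Claim_equal_GUIPString := by
  intro idSp sp srcStr _
  unfold Spec_GUIPString GUIPString GUIPString_alt
  have hf := foldl_fieldsOf sp.toList srcStr.toList [] []
  simp only [List.nil_append] at hf
  simp only [loopA_eq_gField idSp sp.toList srcStr.toList 0, sub_zero, hf]
  rcases lt_or_ge idSp 0 with hneg | hpos
  · rw [gField_neg _ _ _ hneg, if_neg (by omega)]
    decide
  · obtain ⟨n, rfl⟩ : ∃ n : Nat, idSp = (n : Int) := ⟨idSp.toNat, by omega⟩
    rw [gField_nat]
    by_cases hlt : (n : Int) < ((fieldsOf sp.toList srcStr.toList []).length : Int)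
    · rw [if_pos ⟨by omega, hlt⟩]
      congr 1
      rw [PySem.List.pyGet?_natCast]
      have hn : n < (fieldsOf sp.toList srcStr.toList []).length := by omega
      simp [List.getD, List.getElem?_eq_getElem hn]
    · rw [if_neg (by omega)]
      have hn : (fieldsOf sp.toList srcStr.toList []).length ≤ n := by omega
      rw [List.getD_eq_getElem?_getD, List.getElem?_eq_none hn]
      rfl
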